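-- pv_equiv track=rewrite | github.com/TheodorNartherd/RAG_QuerySystem_Survey | vn_querySystem4.py | bfs_connected
-- ===== SOURCE A (Python) =====
-- from collections import defaultdict, deque
--
-- def bfs_connected(start, allowed_nodes, graph):
--     visited = set()
--     queue = deque([start])
--     while queue:
--         node = queue.popleft()
--         if node in visited:
--             continue
--         visited.add(node)
--         for neighbor in graph[node]:
--             if neighbor in allowed_nodes and neighbor not in visited:
--                 queue.append(neighbor)
--     return visited
-- ===== SOURCE B (Python) =====
-- def bfs_connected(start, allowed_nodes, graph):
--     # Level-synchronous frontier expansion: no queue at all; each round merges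
--     # the whole current frontier into visited, then builds the next frontier as
--     # the set of allowed, still-unvisited neighbors of all frontier nodes.
--     visited = set()
--     frontier = {start}
--     while frontier:
--         visited |= frontier
--         next_frontier = set()
--         for node in frontier:
--             for neighbor in graph[node]:
--                 if neighbor in allowed_nodes and neighbor not in visited:
--                     next_frontier.add(neighbor)
--         frontier = next_frontier
--     return visited
-- ===== Notes on version B (the rewrite author's own statement) =====
-- stated objective: alternative
-- what changed: A's node-at-a-time deque BFS (which enqueues duplicates and deduplicates with a visited check at pop time) is replaced by level-synchronous frontier expansion: no queue exists, each round merges the whole frontier set into visited and computes the next frontier as the set of allowed, still-unvisited neighbors of all frontier nodes.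
-- outside the precondition, e.g. on bfs_connected('a', {'b'}, {'a': [], 'c': ['b']}): A returns {'a'}, B returns {'a'}
import Mathlib
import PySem

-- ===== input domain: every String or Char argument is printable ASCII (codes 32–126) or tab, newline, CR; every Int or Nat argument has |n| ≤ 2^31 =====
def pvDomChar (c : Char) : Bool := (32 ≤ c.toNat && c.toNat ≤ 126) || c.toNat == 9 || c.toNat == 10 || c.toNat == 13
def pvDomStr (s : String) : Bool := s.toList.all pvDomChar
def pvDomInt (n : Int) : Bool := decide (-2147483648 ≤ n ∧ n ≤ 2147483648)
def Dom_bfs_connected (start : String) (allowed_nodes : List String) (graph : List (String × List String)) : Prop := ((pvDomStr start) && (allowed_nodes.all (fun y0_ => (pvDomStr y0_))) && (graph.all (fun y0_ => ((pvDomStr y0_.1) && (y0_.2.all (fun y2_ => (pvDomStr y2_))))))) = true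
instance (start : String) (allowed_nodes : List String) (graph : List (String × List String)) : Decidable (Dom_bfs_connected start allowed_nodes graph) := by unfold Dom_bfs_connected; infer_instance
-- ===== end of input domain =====

-- B replaces A's node-at-a-time deque BFS (duplicate enqueues, dedup at pop) by
-- level-synchronous frontier expansion: each round merges the whole frontier into
-- visited and computes the next frontier set; objective: alternative decomposition.

-- ===== PORT A =====
-- graph[node] : first-match dict lookup; `none` (Python KeyError) is excluded by Pre_,
-- the total port reads [] there.
def pvAdj (graph : List (String × List String)) (node : String) : List String :=
  ((PySem.Dict.mk graph).get? node).getD []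

-- the inner `for neighbor in graph[node]: if …: queue.append(neighbor)` loop of A,
-- named so termination and the proofs can cite PySem.List.foldl_append_ite_eq_filter once
lemma pvA_enqueue_eq (allowed_nodes visited' rest ns : List String) :
    ns.foldl (fun q nb => if nb ∈ allowed_nodes ∧ nb ∉ visited' then q ++ [nb] else q) rest
      = rest ++ ns.filter (fun nb => decide (nb ∈ allowed_nodes ∧ nb ∉ visited')) :=
  PySem.List.foldl_append_ite_eq_filter _ ns rest

-- the `while queue:` loop of A; state = (queue, visited)
def pvAGo (allowed_nodes : List String) (graph : List (String × List String))
    (queue visited : List String) : List String :=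
  match queue with
  | [] => visited
  | node :: rest =>
    if node ∈ visited then
      pvAGo allowed_nodes graph rest visited
    else
      let visited' := PySem.Set.add visited node
      let queue' := (pvAdj graph node).foldl
        (fun q nb => if nb ∈ allowed_nodes ∧ nb ∉ visited' then q ++ [nb] else q) rest
      pvAGo allowed_nodes graph queue' visited'
  termination_by (((queue ++ allowed_nodes).toFinset \ visited.toFinset).card, queue.length)
  decreasing_by
  · apply Prod.Lex.right'
    · apply Finset.card_le_card
      intro x hx
      simp only [Finset.mem_sdiff, List.mem_toFinset, List.mem_append, List.mem_cons] at *
      tauto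
    · simp
  · apply Prod.Lex.left
    have hadd : PySem.Set.add visited node = visited ++ [node] := by
      simp [PySem.Set.add, PySem.Set.contains, *]
    simp only [dite_eq_ite]
    rw [pvA_enqueue_eq]
    apply Finset.card_lt_card
    constructor
    · intro x hx
      simp only [hadd, Finset.mem_sdiff, List.mem_toFinset, List.mem_append, List.mem_cons,
        List.mem_filter, decide_eq_true_eq] at *
      obtain ⟨hx1, hx2⟩ := hx
      refine ⟨?_, fun h => hx2 (Or.inl h)⟩
      rcases hx1 with (h | h) | h
      · tauto
      · exact Or.inr h.2.1
      · tauto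
    · intro hsub
      have := hsub (by
        simp only [Finset.mem_sdiff, List.mem_toFinset, List.mem_append, List.mem_cons]
        exact ⟨Or.inl (Or.inl rfl), by assumption⟩)
      simp [hadd] at this

-- A: visited = set(); queue = deque([start]); loop; return visited
def bfs_connected (start : String) (allowed_nodes : List String) (graph : List (String × List String)) : List String :=
  pvAGo allowed_nodes graph [start] []

-- ===== PORT B =====
-- `visited |= frontier` on insertion-ordered sets
def pvUnion (visited frontier : List String) : List String :=
  frontier.foldl PySem.Set.add visited

-- the two nested `for` loops of one round: build next_frontier from []
def pvLvlNext (allowed_nodes : List String) (graph : List (String × List String))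
    (visited frontier : List String) : List String :=
  frontier.foldl
    (fun nf node =>
      (pvAdj graph node).foldl
        (fun nf nb => if nb ∈ allowed_nodes ∧ nb ∉ visited then PySem.Set.add nf nb else nf)
        nf)
    []

-- membership bounds used by pvLvlGo's termination proof
lemma pvMem_union (visited frontier : List String) (x : String) :
    x ∈ pvUnion visited frontier ↔ x ∈ visited ∨ x ∈ frontier := by
  unfold pvUnion
  induction frontier generalizing visited with
  | nil => simp
  | cons f fs ih =>
    simp only [List.foldl_cons, ih, PySem.Set.mem_add, List.mem_cons]
    tauto

lemma pvMem_lvlNext_inner (allowed_nodes visited : List String) :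
    ∀ (ns nf : List String) (x : String),
      x ∈ ns.foldl
        (fun nf nb => if nb ∈ allowed_nodes ∧ nb ∉ visited then PySem.Set.add nf nb else nf) nf →
      x ∈ nf ∨ (x ∈ allowed_nodes ∧ x ∉ visited)
  | [], nf, x, hx => Or.inl hx
  | nb :: ns', nf, x, hx => by
    simp only [List.foldl_cons] at hx
    by_cases hc : nb ∈ allowed_nodes ∧ nb ∉ visited
    · rw [if_pos hc] at hx
      rcases pvMem_lvlNext_inner allowed_nodes visited ns' _ x hx with h | h
      · rcases (PySem.Set.mem_add _ _ _).mp h with h' | h'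
        · exact Or.inl h'
        · exact Or.inr (h' ▸ hc)
      · exact Or.inr h
    · rw [if_neg hc] at hx
      exact pvMem_lvlNext_inner allowed_nodes visited ns' nf x hx

lemma pvMem_lvlNext (allowed_nodes : List String) (graph : List (String × List String))
    (visited : List String) : ∀ (frontier nf : List String) (x : String),
      x ∈ frontier.foldl
        (fun nf node =>
          (pvAdj graph node).foldl
            (fun nf nb => if nb ∈ allowed_nodes ∧ nb ∉ visited then PySem.Set.add nf nb else nf)
            nf) nf →
      x ∈ nf ∨ (x ∈ allowed_nodes ∧ x ∉ visited)
  | [], nf, x, hx => Or.inl hx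
  | v :: fs, nf, x, hx => by
    simp only [List.foldl_cons] at hx
    rcases pvMem_lvlNext allowed_nodes graph visited fs _ x hx with h | h
    · exact pvMem_lvlNext_inner allowed_nodes visited _ nf x h
    · exact Or.inr h

lemma pvLvlNext_sub (allowed_nodes : List String) (graph : List (String × List String))
    (visited frontier : List String) (x : String)
    (hx : x ∈ pvLvlNext allowed_nodes graph visited frontier) :
    x ∈ allowed_nodes ∧ x ∉ visited := by
  unfold pvLvlNext at hx
  exact (pvMem_lvlNext allowed_nodes graph visited frontier [] x hx).resolve_left
    (List.not_mem_nil)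

-- the `while frontier:` loop of B; state = (visited, frontier)
def pvLvlGo (allowed_nodes : List String) (graph : List (String × List String))
    (visited frontier : List String) : List String :=
  if hf : frontier = [] then visited
  else
    let visited' := pvUnion visited frontier
    pvLvlGo allowed_nodes graph visited' (pvLvlNext allowed_nodes graph visited' frontier)
  termination_by ((((frontier ++ allowed_nodes).toFinset \ visited.toFinset).card),
    (if frontier ≠ [] ∧ ∀ x ∈ frontier, x ∈ visited then 1 else 0 : Nat))
  decreasing_by
    by_cases hnew : ∃ x ∈ frontier, x ∉ visited
    · -- some frontier node is new: card strictly decreases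
      apply Prod.Lex.left
      obtain ⟨h, hh, hhv⟩ := hnew
      apply Finset.card_lt_card
      constructor
      · intro x hx
        simp only [Finset.mem_sdiff, List.mem_toFinset, List.mem_append] at hx ⊢
        obtain ⟨hx1, hx2⟩ := hx
        have hx2' : x ∉ visited := fun hmem => hx2 ((pvMem_union _ _ _).mpr (Or.inl hmem))
        refine ⟨?_, hx2'⟩
        rcases hx1 with hcase | hcase
        · exact Or.inr (pvLvlNext_sub _ _ _ _ x hcase).1
        · exact Or.inr hcase
      · intro hsub
        have hmem : h ∈ ((frontier ++ allowed_nodes).toFinset \ visited.toFinset) := by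
          simp only [Finset.mem_sdiff, List.mem_toFinset, List.mem_append]
          exact ⟨Or.inl hh, hhv⟩
        have := hsub hmem
        simp only [Finset.mem_sdiff, List.mem_toFinset] at this
        exact this.2 ((pvMem_union _ _ _).mpr (Or.inr hh))
    · -- whole frontier already visited: card does not grow, flag 1 → 0
      have hall : ∀ x ∈ frontier, x ∈ visited :=
        fun x hx => not_not.mp (fun hv => hnew ⟨x, hx, hv⟩)
      apply Prod.Lex.right'
      · apply Finset.card_le_card
        intro x hx
        simp only [Finset.mem_sdiff, List.mem_toFinset, List.mem_append] at hx ⊢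
        obtain ⟨hx1, hx2⟩ := hx
        have hx2' : x ∉ visited := fun h => hx2 ((pvMem_union _ _ _).mpr (Or.inl h))
        refine ⟨?_, hx2'⟩
        rcases hx1 with h | h
        · exact Or.inr (pvLvlNext_sub _ _ _ _ x h).1
        · exact Or.inr h
      · rw [if_neg ?_, if_pos ⟨hf, hall⟩]
        · exact Nat.zero_lt_one
        · rintro ⟨hne, hall'⟩
          obtain ⟨y, hy⟩ := List.exists_mem_of_ne_nil _ hne
          exact (pvLvlNext_sub _ _ _ _ y hy).2 (hall' y hy)

-- B: visited = set(); frontier = {start}; rounds; return visited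
def bfs_connected_alt (start : String) (allowed_nodes : List String) (graph : List (String × List String)) : List String :=
  pvLvlGo allowed_nodes graph [] [start]

-- ===== PRECONDITION & SPEC =====
-- A does graph[node] on every visited node, a KeyError if the key is missing: Pre_ requires a
-- key for start and for every allowed node occurring in any adjacency list — a checkable
-- over-approximation of "every reachable node is a key"; it also excludes graphs whose only
-- key-less allowed neighbours sit in an unreachable part, on which A still returns.
def Pre_bfs_connected (start : String) (allowed_nodes : List String) (graph : List (String × List String)) : Prop :=
  start ∈ graph.map Prod.fst ∧
  ∀ p ∈ graph, ∀ nb ∈ p.2, nb ∈ allowed_nodes → nb ∈ graph.map Prod.fst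
instance (start : String) (allowed_nodes : List String) (graph : List (String × List String)) : Decidable (Pre_bfs_connected start allowed_nodes graph) := by unfold Pre_bfs_connected; infer_instance

def pvWitness_bfs_connected : String × List String × (List (String × List String)) :=
  ("a", ["b"], [("a", ["b", "c"]), ("b", ["a"])])

def Spec_bfs_connected (start : String) (allowed_nodes : List String) (graph : List (String × List String)) (out : List String) : Prop := out = bfs_connected_alt start allowed_nodes graph
instance (start : String) (allowed_nodes : List String) (graph : List (String × List String)) (out : List String) : Decidable (Spec_bfs_connected start allowed_nodes graph out) := by unfold Spec_bfs_connected; infer_instance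

-- ===== CLAIM (what is proved, stated in full; the proofs are below) =====
def Claim_equal_bfs_connected : Prop := ∀ (start : String) (allowed_nodes : List String) (graph : List (String × List String)), Dom_bfs_connected start allowed_nodes graph → Pre_bfs_connected start allowed_nodes graph → Spec_bfs_connected start allowed_nodes graph (bfs_connected start allowed_nodes graph)

-- ===== LEMMAS AND PROOFS =====

-- the nodes newly discovered while scanning one adjacency list ns against the seen set s
def pvNew (allowed_nodes : List String) (s ns : List String) : List String :=
  match ns with
  | [] => []
  | nb :: ns' =>
    if nb ∈ allowed_nodes ∧ nb ∉ s then nb :: pvNew allowed_nodes (s ++ [nb]) ns'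
    else pvNew allowed_nodes s ns'

lemma pvNew_sub (allowed_nodes : List String) : ∀ (ns s : List String),
    ∀ x ∈ pvNew allowed_nodes s ns, x ∈ allowed_nodes ∧ x ∉ s
  | [], s => by simp [pvNew]
  | nb :: ns', s => by
    by_cases hc : nb ∈ allowed_nodes ∧ nb ∉ s
    · intro x hx
      rw [pvNew, if_pos hc] at hx
      rcases List.mem_cons.mp hx with rfl | hx'
      · exact hc
      · have := pvNew_sub allowed_nodes ns' (s ++ [nb]) x hx'
        exact ⟨this.1, fun h => this.2 (List.mem_append_left _ h)⟩
    · intro x hx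
      rw [pvNew, if_neg hc] at hx
      exact pvNew_sub allowed_nodes ns' s x hx

-- dedup-at-discovery pointer scan: the common normal form of both loops
def pvSeq (allowed_nodes : List String) (graph : List (String × List String))
    (todo seen : List String) : List String :=
  match todo with
  | [] => []
  | v :: rest =>
    let n := pvNew allowed_nodes seen (pvAdj graph v)
    v :: pvSeq allowed_nodes graph (rest ++ n) (seen ++ n)
  termination_by (((todo ++ allowed_nodes).toFinset \ seen.toFinset).card, todo.length)
  decreasing_by
    rcases hn : pvNew allowed_nodes seen (pvAdj graph v) with _ | ⟨x0, ns'⟩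
    · apply Prod.Lex.right'
      · apply Finset.card_le_card
        intro x hx
        simp only [hn, List.append_nil, Finset.mem_sdiff, List.mem_toFinset, List.mem_append,
          List.mem_cons] at *
        tauto
      · simp
    · apply Prod.Lex.left
      have hsub := pvNew_sub allowed_nodes (pvAdj graph v) seen
      rw [hn] at hsub
      have hx0 := hsub x0 List.mem_cons_self
      apply Finset.card_lt_card
      constructor
      · intro x hx
        rw [Finset.mem_sdiff] at hx ⊢
        obtain ⟨hx1, hx2⟩ := hx
        simp only [List.mem_toFinset, List.mem_append, List.mem_cons] at hx1 hx2 ⊢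
        have hx' : x = x0 ∨ x ∈ ns' → x ∈ allowed_nodes :=
          fun h => (hsub x (List.mem_cons.mpr h)).1
        constructor
        · tauto
        · tauto
      · intro hsub'
        have hmem : x0 ∈ ((v :: rest ++ allowed_nodes).toFinset \ seen.toFinset) := by
          rw [Finset.mem_sdiff]
          simp only [List.mem_toFinset, List.mem_append, List.mem_cons]
          exact ⟨Or.inr hx0.1, hx0.2⟩
        have hfin := hsub' hmem
        rw [Finset.mem_sdiff] at hfin
        exact hfin.2 (by simp)

lemma pvSeq_cons (allowed_nodes : List String) (graph : List (String × List String))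
    (v : String) (rest seen : List String) :
    pvSeq allowed_nodes graph (v :: rest) seen
      = v :: pvSeq allowed_nodes graph
          (rest ++ pvNew allowed_nodes seen (pvAdj graph v))
          (seen ++ pvNew allowed_nodes seen (pvAdj graph v)) := by
  rw [pvSeq]

-- ============ A-side: pvAGo reduces to pvSeq ============

-- first occurrences in q of elements not in v: the nodes of A's queue q that are still
-- undiscovered, in the order A first pops them
def pvFirstNew (v q : List String) : List String :=
  match q with
  | [] => []
  | x :: q' => if x ∈ v then pvFirstNew v q' else x :: pvFirstNew (v ++ [x]) q'

lemma pvFirstNew_append : ∀ (q1 v q2 : List String),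
    pvFirstNew v (q1 ++ q2) = pvFirstNew v q1 ++ pvFirstNew (v ++ pvFirstNew v q1) q2
  | [], v, q2 => by simp [pvFirstNew]
  | x :: q1', v, q2 => by
    by_cases hx : x ∈ v
    · simp only [List.cons_append, pvFirstNew, if_pos hx]
      exact pvFirstNew_append q1' v q2
    · simp only [List.cons_append, pvFirstNew, if_neg hx]
      rw [pvFirstNew_append q1' (v ++ [x]) q2]
      simp

lemma pvFirstNew_filter (allowed_nodes v : List String) : ∀ (ns S : List String),
    (∀ x ∈ v, x ∈ S) →
    pvFirstNew S (ns.filter (fun nb => decide (nb ∈ allowed_nodes ∧ nb ∉ v)))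
      = pvNew allowed_nodes S ns
  | [], S, _ => by simp [pvFirstNew, pvNew]
  | nb :: ns', S, hsub => by
    by_cases hc : nb ∈ allowed_nodes ∧ nb ∉ v
    · rw [List.filter_cons_of_pos (by simpa using hc)]
      by_cases hS : nb ∈ S
      · rw [pvFirstNew, if_pos hS, pvNew, if_neg (by tauto),
          pvFirstNew_filter allowed_nodes v ns' S hsub]
      · rw [pvFirstNew, if_neg hS, pvNew, if_pos ⟨hc.1, hS⟩,
          pvFirstNew_filter allowed_nodes v ns' (S ++ [nb])
            (fun x hx => List.mem_append_left _ (hsub x hx))]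
    · rw [List.filter_cons_of_neg (by simpa using hc), pvNew,
        pvFirstNew_filter allowed_nodes v ns' S hsub]
      rw [if_neg (fun h => hc ⟨h.1, fun hv => h.2 (hsub nb hv)⟩)]

lemma pvMainA (allowed_nodes : List String) (graph : List (String × List String)) :
    ∀ queue visited, pvAGo allowed_nodes graph queue visited
      = visited ++ pvSeq allowed_nodes graph (pvFirstNew visited queue)
          (visited ++ pvFirstNew visited queue) := by
  intro queue visited
  fun_induction pvAGo allowed_nodes graph queue visited with
  | case1 => simp [pvFirstNew, pvSeq]
  | case2 visited node rest hv ih =>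
    rw [pvFirstNew, if_pos hv]
    exact ih
  | case3 visited node rest hv visited' queue' ih =>
    have hadd : visited' = visited ++ [node] := by
      simp [visited', hv]
    have hq : queue' = rest ++ (pvAdj graph node).filter
        (fun nb => decide (nb ∈ allowed_nodes ∧ nb ∉ visited')) := pvA_enqueue_eq _ _ _ _
    rw [ih]
    set T := pvFirstNew visited' rest with hT
    have h1 : pvFirstNew visited' queue'
        = T ++ pvNew allowed_nodes (visited' ++ T) (pvAdj graph node) := by
      rw [hq, pvFirstNew_append, pvFirstNew_filter allowed_nodes visited' (pvAdj graph node)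
        (visited' ++ T) (fun x hx => List.mem_append_left _ hx)]
    have h2 : pvFirstNew visited (node :: rest) = node :: T := by
      rw [pvFirstNew, if_neg hv, hT, hadd]
    rw [h1, h2, pvSeq_cons]
    rw [hadd]
    simp [List.append_assoc]

-- ============ B-side: pvLvlGo reduces to pvSeq ============

-- discoveries of one level, node by node, against a growing seen set
def pvChain (allowed_nodes : List String) (graph : List (String × List String))
    (seen frontier : List String) : List String :=
  match frontier with
  | [] => []
  | v :: fs =>
    let n := pvNew allowed_nodes seen (pvAdj graph v)
    n ++ pvChain allowed_nodes graph (seen ++ n) fs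

lemma pvChain_sub (allowed_nodes : List String) (graph : List (String × List String)) :
    ∀ (frontier seen : List String), ∀ x ∈ pvChain allowed_nodes graph seen frontier,
      x ∈ allowed_nodes ∧ x ∉ seen
  | [], seen => by simp [pvChain]
  | v :: fs, seen => by
    intro x hx
    rw [pvChain] at hx
    rcases List.mem_append.mp hx with h | h
    · exact pvNew_sub allowed_nodes _ seen x h
    · have := pvChain_sub allowed_nodes graph fs _ x h
      exact ⟨this.1, fun hm => this.2 (List.mem_append_left _ hm)⟩

lemma pvNew_nodup (allowed_nodes : List String) : ∀ (ns s : List String),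
    (pvNew allowed_nodes s ns).Nodup
  | [], s => by simp [pvNew]
  | nb :: ns', s => by
    by_cases hc : nb ∈ allowed_nodes ∧ nb ∉ s
    · rw [pvNew, if_pos hc, List.nodup_cons]
      refine ⟨fun hmem => ?_, pvNew_nodup allowed_nodes ns' (s ++ [nb])⟩
      exact (pvNew_sub allowed_nodes ns' (s ++ [nb]) nb hmem).2 (by simp)
    · rw [pvNew, if_neg hc]
      exact pvNew_nodup allowed_nodes ns' s

lemma pvChain_nodup (allowed_nodes : List String) (graph : List (String × List String)) :
    ∀ (frontier seen : List String), (pvChain allowed_nodes graph seen frontier).Nodup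
  | [], seen => by simp [pvChain]
  | v :: fs, seen => by
    rw [pvChain, List.nodup_append]
    refine ⟨pvNew_nodup allowed_nodes _ seen, pvChain_nodup allowed_nodes graph fs _, ?_⟩
    rintro x hx y hy rfl
    exact (pvChain_sub allowed_nodes graph fs _ x hy).2 (List.mem_append_right _ hx)

-- the inner foldl of one round is pvNew against the combined seen set
lemma pvInner_eq (allowed_nodes visited : List String) : ∀ (ns nf : List String),
    (∀ x ∈ nf, x ∉ visited) →
    ns.foldl
      (fun nf nb => if nb ∈ allowed_nodes ∧ nb ∉ visited then PySem.Set.add nf nb else nf) nf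
    = nf ++ pvNew allowed_nodes (visited ++ nf) ns
  | [], nf, _ => by simp [pvNew]
  | nb :: ns', nf, hnf => by
    simp only [List.foldl_cons]
    by_cases hv : nb ∈ allowed_nodes ∧ nb ∉ visited
    · rw [if_pos hv]
      by_cases hnb : nb ∈ nf
      · have hadd : PySem.Set.add nf nb = nf := by
          simp [PySem.Set.add, PySem.Set.contains, hnb]
        rw [hadd, pvNew, if_neg (fun h => h.2 (List.mem_append_right _ hnb)),
          pvInner_eq allowed_nodes visited ns' nf hnf]
      · have hadd : PySem.Set.add nf nb = nf ++ [nb] := by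
          simp [PySem.Set.add, PySem.Set.contains, hnb]
        rw [hadd, pvNew,
          if_pos ⟨hv.1, fun h => (List.mem_append.mp h).elim hv.2 hnb⟩,
          pvInner_eq allowed_nodes visited ns' (nf ++ [nb])
            (by intro x hx; rcases List.mem_append.mp hx with h | h
                · exact hnf x h
                · simp at h; subst h; exact hv.2)]
        simp
    · rw [if_neg hv, pvNew,
        if_neg (fun h => hv ⟨h.1, fun hm => h.2 (List.mem_append_left _ hm)⟩),
        pvInner_eq allowed_nodes visited ns' nf hnf]

-- one round's double loop computes pvChain
lemma pvLvlNext_chain (allowed_nodes : List String) (graph : List (String × List String))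
    (visited : List String) : ∀ (frontier nf : List String),
    (∀ x ∈ nf, x ∉ visited) →
    frontier.foldl
      (fun nf node =>
        (pvAdj graph node).foldl
          (fun nf nb => if nb ∈ allowed_nodes ∧ nb ∉ visited then PySem.Set.add nf nb else nf)
          nf) nf
    = nf ++ pvChain allowed_nodes graph (visited ++ nf) frontier
  | [], nf, _ => by simp [pvChain]
  | v :: fs, nf, hnf => by
    simp only [List.foldl_cons]
    rw [pvInner_eq allowed_nodes visited (pvAdj graph v) nf hnf]
    rw [pvLvlNext_chain allowed_nodes graph visited fs _ (by
      intro x hx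
      rcases List.mem_append.mp hx with h | h
      · exact hnf x h
      · have := pvNew_sub allowed_nodes (pvAdj graph v) (visited ++ nf) x h
        exact fun hm => this.2 (List.mem_append_left _ hm))]
    rw [pvChain]
    simp [List.append_assoc]

-- a disjoint nodup frontier unions as plain append
lemma pvUnion_eq_append : ∀ (frontier visited : List String),
    frontier.Nodup → (∀ x ∈ frontier, x ∉ visited) →
    pvUnion visited frontier = visited ++ frontier
  | [], visited, _, _ => by simp [pvUnion]
  | f :: fs, visited, hnd, hdis => by
    unfold pvUnion
    simp only [List.foldl_cons]
    have hadd : PySem.Set.add visited f = visited ++ [f] := by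
      simp [PySem.Set.add, PySem.Set.contains, hdis f List.mem_cons_self]
    rw [hadd]
    have := pvUnion_eq_append fs (visited ++ [f]) (List.Nodup.of_cons hnd) (by
      intro x hx
      simp only [List.mem_append, List.mem_singleton]
      rintro (h | rfl)
      · exact hdis x (List.mem_cons_of_mem _ hx) h
      · exact (List.nodup_cons.mp hnd).1 hx)
    unfold pvUnion at this
    rw [this]
    simp

-- pvSeq consumes a whole level before touching its discoveries
lemma pvSeq_level (allowed_nodes : List String) (graph : List (String × List String)) :
    ∀ (fs tail seen : List String),
    pvSeq allowed_nodes graph (fs ++ tail) seen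
      = fs ++ pvSeq allowed_nodes graph (tail ++ pvChain allowed_nodes graph seen fs)
          (seen ++ pvChain allowed_nodes graph seen fs)
  | [], tail, seen => by simp [pvChain]
  | v :: fs', tail, seen => by
    rw [List.cons_append, pvSeq_cons]
    rw [List.append_assoc]
    rw [pvSeq_level allowed_nodes graph fs'
      (tail ++ pvNew allowed_nodes seen (pvAdj graph v))
      (seen ++ pvNew allowed_nodes seen (pvAdj graph v))]
    rw [pvChain]
    simp [List.append_assoc]

lemma pvMainB (allowed_nodes : List String) (graph : List (String × List String)) :
    ∀ visited frontier, frontier.Nodup → (∀ x ∈ frontier, x ∉ visited) →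
      pvLvlGo allowed_nodes graph visited frontier
        = visited ++ pvSeq allowed_nodes graph frontier (visited ++ frontier) := by
  intro visited frontier
  fun_induction pvLvlGo allowed_nodes graph visited frontier with
  | case1 => simp [pvSeq]
  | case2 visited frontier hf visited' ih =>
    intro hnd hdis
    have hvis : visited' = visited ++ frontier :=
      pvUnion_eq_append frontier visited hnd hdis
    have hnext : pvLvlNext allowed_nodes graph visited' frontier
        = pvChain allowed_nodes graph visited' frontier := by
      unfold pvLvlNext
      have := pvLvlNext_chain allowed_nodes graph visited' frontier [] (by simp)
      simpa using this
    have hchain_nd : (pvChain allowed_nodes graph visited' frontier).Nodup :=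
      pvChain_nodup allowed_nodes graph frontier visited'
    have hchain_dis : ∀ x ∈ pvChain allowed_nodes graph visited' frontier, x ∉ visited' :=
      fun x hx => (pvChain_sub allowed_nodes graph frontier visited' x hx).2
    rw [hnext] at ih
    rw [hnext, ih hchain_nd hchain_dis, hvis]
    have := pvSeq_level allowed_nodes graph frontier [] (visited ++ frontier)
    simp only [List.append_nil] at this
    rw [this]
    simp [List.append_assoc]

-- ===== VERDICT (by name: the statement is the Claim_ definition above) =====
theorem bfs_connected_spec : Claim_equal_bfs_connected := by
  intro start allowed_nodes graph _ _
  unfold Spec_bfs_connected bfs_connected bfs_connected_alt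
  rw [pvMainB allowed_nodes graph [] [start] (by simp) (by simp)]
  have := pvMainA allowed_nodes graph [start] []
  simpa [pvFirstNew] using this
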